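-- pv_equiv track=rewrite | github.com/aaronwalsman/dirt | dirt/gridworld2d/distributed.py | _make_perms
-- ===== SOURCE A (Python) =====
-- from typing import Tuple, Dict, List
--
-- def _make_perms(tile_rows: int, tile_cols: int) -> Dict[str, List[Tuple[int, int]]]:
--     def idx(r: int, c: int) -> int:
--         return r * tile_cols + c
--
--     perms = {
--         "right": [],
--         "left": [],
--         "down": [],
--         "up": [],
--         "down_right": [],
--         "down_left": [],
--         "up_right": [],
--         "up_left": [],
--     }
--     for r in range(tile_rows):
--         for c in range(tile_cols):
--             src = idx(r, c)
--             perms["right"].append((src, idx(r, (c + 1) % tile_cols)))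
--             perms["left"].append((src, idx(r, (c - 1) % tile_cols)))
--             perms["down"].append((src, idx((r + 1) % tile_rows, c)))
--             perms["up"].append((src, idx((r - 1) % tile_rows, c)))
--             perms["down_right"].append((src, idx((r + 1) % tile_rows, (c + 1) % tile_cols)))
--             perms["down_left"].append((src, idx((r + 1) % tile_rows, (c - 1) % tile_cols)))
--             perms["up_right"].append((src, idx((r - 1) % tile_rows, (c + 1) % tile_cols)))
--             perms["up_left"].append((src, idx((r - 1) % tile_rows, (c - 1) % tile_cols)))
--     return perms
-- ===== SOURCE B (Python) =====
-- from typing import Tuple, Dict, List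
--
-- def _make_perms(tile_rows: int, tile_cols: int) -> Dict[str, List[Tuple[int, int]]]:
--     # Rotation-based construction: cardinal target lists are pure list rotations
--     # (slicing, no per-cell modular arithmetic); diagonals are compositions of two
--     # cardinal permutations via list indexing. Entry i of each list has source i.
--     keys = ["right", "left", "down", "up",
--             "down_right", "down_left", "up_right", "up_left"]
--     if tile_rows <= 0 or tile_cols <= 0:
--         return {k: [] for k in keys}
--     n = tile_rows * tile_cols
--     base = list(range(n))
--     right_t, left_t = [], []
--     for r0 in range(0, n, tile_cols):
--         block = base[r0:r0 + tile_cols]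
--         right_t += block[1:] + block[:1]                          # rotate row left by 1
--         left_t += block[tile_cols - 1:] + block[:tile_cols - 1]   # rotate row right by 1
--     down_t = base[tile_cols:] + base[:tile_cols]                  # rotate grid by one row
--     up_t = base[n - tile_cols:] + base[:n - tile_cols]
--     dr = [right_t[j] for j in down_t]
--     dl = [left_t[j] for j in down_t]
--     ur = [right_t[j] for j in up_t]
--     ul = [left_t[j] for j in up_t]
--     vals = [right_t, left_t, down_t, up_t, dr, dl, ur, ul]
--     return {k: list(enumerate(v)) for k, v in zip(keys, vals)}
-- ===== Notes on version B (the rewrite author's own statement) =====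
-- stated objective: alternative
-- what changed: Replaces A's per-cell modular arithmetic over a nested row/column loop by whole-list rotations built with slicing (cardinal target lists are rotated copies of range(n)) and derives the four diagonal lists by composing two cardinal permutations via list indexing.
import Mathlib
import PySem

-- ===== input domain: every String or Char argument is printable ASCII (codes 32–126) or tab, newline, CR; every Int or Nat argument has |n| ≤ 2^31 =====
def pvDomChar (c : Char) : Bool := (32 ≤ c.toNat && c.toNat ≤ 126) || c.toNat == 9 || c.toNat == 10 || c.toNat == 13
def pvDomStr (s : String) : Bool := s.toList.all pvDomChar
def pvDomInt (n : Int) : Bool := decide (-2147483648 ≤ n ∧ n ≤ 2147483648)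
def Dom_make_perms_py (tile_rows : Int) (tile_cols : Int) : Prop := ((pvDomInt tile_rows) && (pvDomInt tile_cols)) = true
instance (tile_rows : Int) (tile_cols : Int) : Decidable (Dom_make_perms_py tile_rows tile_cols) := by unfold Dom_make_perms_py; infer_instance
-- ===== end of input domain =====

-- B replaces A's per-cell modular arithmetic (nested row/column loop) by whole-list
-- rotations built with slicing, composing the diagonals from two cardinal permutations
-- by list indexing; objective: alternative algorithm (same cost).

-- ===== PORT A =====
-- state of the 8 dict lists A appends to (fixed literal keys, so a record models the dict's value state)
structure Perms8 where
  right : List (Int × Int)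
  left : List (Int × Int)
  down : List (Int × Int)
  up : List (Int × Int)
  dr : List (Int × Int)
  dl : List (Int × Int)
  ur : List (Int × Int)
  ul : List (Int × Int)
deriving Repr, DecidableEq

def make_perms_py (tile_rows : Int) (tile_cols : Int) : List (String × List (Int × Int)) :=
  let idx : Int → Int → Int := fun r c => r * tile_cols + c
  let final : Perms8 :=
    (PySem.List.pyRange 0 tile_rows 1).foldl (fun p r =>
      (PySem.List.pyRange 0 tile_cols 1).foldl (fun p c =>
        let src := idx r c
        { right := p.right ++ [(src, idx r (PySem.Int.mod (c + 1) tile_cols))]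
          left  := p.left  ++ [(src, idx r (PySem.Int.mod (c - 1) tile_cols))]
          down  := p.down  ++ [(src, idx (PySem.Int.mod (r + 1) tile_rows) c)]
          up    := p.up    ++ [(src, idx (PySem.Int.mod (r - 1) tile_rows) c)]
          dr    := p.dr    ++ [(src, idx (PySem.Int.mod (r + 1) tile_rows) (PySem.Int.mod (c + 1) tile_cols))]
          dl    := p.dl    ++ [(src, idx (PySem.Int.mod (r + 1) tile_rows) (PySem.Int.mod (c - 1) tile_cols))]
          ur    := p.ur    ++ [(src, idx (PySem.Int.mod (r - 1) tile_rows) (PySem.Int.mod (c + 1) tile_cols))]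
          ul    := p.ul    ++ [(src, idx (PySem.Int.mod (r - 1) tile_rows) (PySem.Int.mod (c - 1) tile_cols))] }) p)
      ⟨[], [], [], [], [], [], [], []⟩
  [("right", final.right), ("left", final.left), ("down", final.down), ("up", final.up),
   ("down_right", final.dr), ("down_left", final.dl), ("up_right", final.ur), ("up_left", final.ul)]

-- ===== PORT B =====
-- transliteration of Source B: cardinal target lists by list rotation (slicing), diagonals
-- by composing two cardinal permutations via indexing; 'right_t[j]' is ported with
-- pyGetD (the index is provably in range wherever Source B evaluates it, so the default is never used)
def make_perms_py_alt (tile_rows : Int) (tile_cols : Int) : List (String × List (Int × Int)) :=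
  if tile_rows ≤ 0 ∨ tile_cols ≤ 0 then
    [("right", []), ("left", []), ("down", []), ("up", []),
     ("down_right", []), ("down_left", []), ("up_right", []), ("up_left", [])]
  else
    let n := tile_rows * tile_cols
    let base := PySem.List.pyRange 0 n 1
    let rl := (PySem.List.pyRange 0 n tile_cols).foldl (fun (p : List Int × List Int) r0 =>
        let block := PySem.List.slice base (some r0) (some (r0 + tile_cols))
        (p.1 ++ (PySem.List.slice block (some 1) none ++ PySem.List.slice block none (some 1)),
         p.2 ++ (PySem.List.slice block (some (tile_cols - 1)) none ++
                 PySem.List.slice block none (some (tile_cols - 1))))) ([], [])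
    let right_t := rl.1
    let left_t := rl.2
    let down_t := PySem.List.slice base (some tile_cols) none ++ PySem.List.slice base none (some tile_cols)
    let up_t := PySem.List.slice base (some (n - tile_cols)) none ++ PySem.List.slice base none (some (n - tile_cols))
    let dr := down_t.map (fun j => PySem.List.pyGetD right_t j 0)
    let dl := down_t.map (fun j => PySem.List.pyGetD left_t j 0)
    let ur := up_t.map (fun j => PySem.List.pyGetD right_t j 0)
    let ul := up_t.map (fun j => PySem.List.pyGetD left_t j 0)
    [("right", PySem.List.enumerate right_t 0), ("left", PySem.List.enumerate left_t 0),
     ("down", PySem.List.enumerate down_t 0), ("up", PySem.List.enumerate up_t 0),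
     ("down_right", PySem.List.enumerate dr 0), ("down_left", PySem.List.enumerate dl 0),
     ("up_right", PySem.List.enumerate ur 0), ("up_left", PySem.List.enumerate ul 0)]

-- ===== PRECONDITION & SPEC =====
def Spec_make_perms_py (tile_rows : Int) (tile_cols : Int) (out : List (String × List (Int × Int))) : Prop := out = make_perms_py_alt tile_rows tile_cols
instance (tile_rows : Int) (tile_cols : Int) (out : List (String × List (Int × Int))) : Decidable (Spec_make_perms_py tile_rows tile_cols out) := by unfold Spec_make_perms_py; infer_instance

-- ===== CLAIM (what is proved, stated in full; the proofs are below) =====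
def Claim_equal_make_perms_py : Prop := ∀ (tile_rows : Int) (tile_cols : Int), Dom_make_perms_py tile_rows tile_cols → Spec_make_perms_py tile_rows tile_cols (make_perms_py tile_rows tile_cols)

-- ===== LEMMAS AND PROOFS =====

-- closed-form per-cell neighbour functions (proof-side normal form, used by neither port)
def pvPhiRight (C i : Int) : Int :=
  PySem.Int.floordiv i C * C + PySem.Int.mod (PySem.Int.mod i C + 1) C

def pvPhiLeft (C i : Int) : Int :=
  PySem.Int.floordiv i C * C + PySem.Int.mod (PySem.Int.mod i C - 1) C

def pvPhiDown (R C i : Int) : Int :=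
  PySem.Int.mod (PySem.Int.floordiv i C + 1) R * C + PySem.Int.mod i C

def pvPhiUp (R C i : Int) : Int :=
  PySem.Int.mod (PySem.Int.floordiv i C - 1) R * C + PySem.Int.mod i C

-- the common normal form both ports are reduced to
def pvNormal (R C : Int) : List (String × List (Int × Int)) :=
  let n : Int := if 0 < R ∧ 0 < C then R * C else 0
  let rng := PySem.List.pyRange 0 n 1
  [("right", rng.map (fun i => (i, pvPhiRight C i))),
   ("left", rng.map (fun i => (i, pvPhiLeft C i))),
   ("down", rng.map (fun i => (i, pvPhiDown R C i))),
   ("up", rng.map (fun i => (i, pvPhiUp R C i))),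
   ("down_right", rng.map (fun i => (i, pvPhiRight C (pvPhiDown R C i)))),
   ("down_left", rng.map (fun i => (i, pvPhiLeft C (pvPhiDown R C i)))),
   ("up_right", rng.map (fun i => (i, pvPhiRight C (pvPhiUp R C i)))),
   ("up_left", rng.map (fun i => (i, pvPhiLeft C (pvPhiUp R C i))))]

-- divmod recovery: for 0 ≤ c < C, (r*C+c) // C = r and (r*C+c) % C = c
lemma pv_divmod_rec (C r c : Int) (hC : 0 < C) (hc0 : 0 ≤ c) (hcC : c < C) :
    PySem.Int.floordiv (r * C + c) C = r ∧ PySem.Int.mod (r * C + c) C = c := by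
  rw [PySem.Int.floordiv_eq_ediv_of_pos hC, PySem.Int.mod_eq_emod_of_pos hC,
      show r * C + c = c + r * C from by ring]
  constructor
  · rw [Int.add_mul_ediv_right _ _ hC.ne', Int.ediv_eq_zero_of_lt hc0 hcC, zero_add]
  · rw [show c + r * C = c + C * r from by ring, Int.add_mul_emod_self_left,
        Int.emod_eq_of_lt hc0 hcC]

lemma pv_mod_eq_self (a R : Int) (h0 : 0 ≤ a) (h1 : a < R) : PySem.Int.mod a R = a := by
  rw [PySem.Int.mod_eq_emod_of_pos (by omega)]
  exact Int.emod_eq_of_lt h0 h1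

lemma pv_mod_add_R (a R : Int) (hR : 0 < R) (h0 : 0 ≤ a + R) (h1 : a + R < R) :
    PySem.Int.mod a R = a + R := by
  rw [PySem.Int.mod_eq_emod_of_pos hR]
  have h2 : (a + R * 1) % R = a % R := Int.add_mul_emod_self_left a R 1
  rw [show a + R * 1 = a + R from by ring] at h2
  rw [← h2, Int.emod_eq_of_lt h0 h1]

lemma pv_mod_self (R : Int) (hR : 0 < R) : PySem.Int.mod R R = 0 := by
  rw [PySem.Int.mod_eq_emod_of_pos hR]; simp

-- range over R*C cells splits into row blocks
lemma pv_range_split (C : Int) (hC : 0 < C) (m : Nat) :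
    PySem.List.pyRange 0 ((m : Int) * C) 1 =
      (PySem.List.pyRange 0 (m : Int) 1).flatMap
        (fun r => (PySem.List.pyRange 0 C 1).map (fun c => r * C + c)) := by
  induction m with
  | zero => simp [PySem.List.pyRange_one_eq_nil]
  | succ k ih =>
      have h1 : (0 : Int) ≤ (k : Int) * C := by positivity
      have h2 : (k : Int) * C ≤ ((k : Int) + 1) * C := by nlinarith
      have hk : (0 : Int) ≤ (k : Int) := by positivity
      have hsplit := PySem.List.pyRange_one_append 0 ((k : Int) * C) (((k : Int) + 1) * C) h1 h2
      have hrow : PySem.List.pyRange ((k : Int) * C) (((k : Int) + 1) * C) 1 =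
          (PySem.List.pyRange 0 C 1).map (fun c => (k : Int) * C + c) := by
        rw [PySem.List.pyRange_one ((k : Int) * C) (((k : Int) + 1) * C),
            PySem.List.pyRange_one 0 C]
        have : ((k : Int) + 1) * C - (k : Int) * C = C - 0 := by ring
        rw [this]
        simp [List.map_map, Function.comp]
      have hR : PySem.List.pyRange 0 ((k : Int) + 1) 1 =
          PySem.List.pyRange 0 (k : Int) 1 ++ [(k : Int)] :=
        PySem.List.pyRange_one_succ_right hk
      push_cast
      rw [hsplit, hrow, ih, hR]
      simp

-- generic direction lemma: A's row-block flatMap equals the flat indexed map of a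
-- per-cell function agreeing on in-range cells
lemma pv_dir_flat (R C : Int) (t : Int → Int → Int) (tB : Int → Int)
    (h : ∀ r c, 0 ≤ r → r < R → 0 ≤ c → c < C → tB (r * C + c) = t r c) :
    (PySem.List.pyRange 0 R 1).flatMap
        (fun r => (PySem.List.pyRange 0 C 1).map (fun c => (r * C + c, t r c))) =
      (PySem.List.pyRange 0 (if 0 < R ∧ 0 < C then R * C else 0) 1).map (fun i => (i, tB i)) := by
  by_cases hRC : 0 < R ∧ 0 < C
  · obtain ⟨hR, hC⟩ := hRC
    simp only [if_pos (And.intro hR hC)]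
    obtain ⟨m, hm⟩ : ∃ m : Nat, R = (m : Int) := ⟨R.toNat, by omega⟩
    subst hm
    rw [pv_range_split C hC m, List.map_flatMap]
    apply List.flatMap_congr
    intro r hr
    rw [List.map_map]
    apply List.map_congr_left
    intro c hc
    have hr' := (PySem.List.mem_pyRange_one).1 hr
    have hc' := (PySem.List.mem_pyRange_one).1 hc
    simp only [Function.comp]
    rw [h r c hr'.1 hr'.2 hc'.1 hc'.2]
  · simp only [if_neg hRC]
    rw [PySem.List.pyRange_one_eq_nil (le_refl (0:Int))]
    simp only [List.map_nil]
    rcases not_and_or.1 hRC with hR | hC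
    · rw [PySem.List.pyRange_one_eq_nil (show R ≤ 0 by omega)]
      rfl
    · rw [PySem.List.pyRange_one_eq_nil (show C ≤ 0 by omega)]
      simp

-- closed form of A's inner (column) loop
lemma pv_inner (R C r : Int) (l : List Int) (p : Perms8) :
    l.foldl (fun (p : Perms8) (c : Int) => Perms8.mk
      (p.right ++ [(r * C + c, r * C + PySem.Int.mod (c + 1) C)])
      (p.left  ++ [(r * C + c, r * C + PySem.Int.mod (c - 1) C)])
      (p.down  ++ [(r * C + c, PySem.Int.mod (r + 1) R * C + c)])
      (p.up    ++ [(r * C + c, PySem.Int.mod (r - 1) R * C + c)])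
      (p.dr    ++ [(r * C + c, PySem.Int.mod (r + 1) R * C + PySem.Int.mod (c + 1) C)])
      (p.dl    ++ [(r * C + c, PySem.Int.mod (r + 1) R * C + PySem.Int.mod (c - 1) C)])
      (p.ur    ++ [(r * C + c, PySem.Int.mod (r - 1) R * C + PySem.Int.mod (c + 1) C)])
      (p.ul    ++ [(r * C + c, PySem.Int.mod (r - 1) R * C + PySem.Int.mod (c - 1) C)])) p =
    { right := p.right ++ l.map (fun c => (r * C + c, r * C + PySem.Int.mod (c + 1) C))
      left  := p.left  ++ l.map (fun c => (r * C + c, r * C + PySem.Int.mod (c - 1) C))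
      down  := p.down  ++ l.map (fun c => (r * C + c, PySem.Int.mod (r + 1) R * C + c))
      up    := p.up    ++ l.map (fun c => (r * C + c, PySem.Int.mod (r - 1) R * C + c))
      dr    := p.dr    ++ l.map (fun c => (r * C + c, PySem.Int.mod (r + 1) R * C + PySem.Int.mod (c + 1) C))
      dl    := p.dl    ++ l.map (fun c => (r * C + c, PySem.Int.mod (r + 1) R * C + PySem.Int.mod (c - 1) C))
      ur    := p.ur    ++ l.map (fun c => (r * C + c, PySem.Int.mod (r - 1) R * C + PySem.Int.mod (c + 1) C))
      ul    := p.ul    ++ l.map (fun c => (r * C + c, PySem.Int.mod (r - 1) R * C + PySem.Int.mod (c - 1) C)) } := by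
  induction l generalizing p with
  | nil => simp
  | cons x xs ih => simp [ih]

-- closed form of A's outer (row) loop over any row list
lemma pv_outer (R C : Int) (L : List Int) (p : Perms8) :
    L.foldl (fun (p : Perms8) (r : Int) =>
      (PySem.List.pyRange 0 C 1).foldl (fun (p : Perms8) (c : Int) => Perms8.mk
        (p.right ++ [(r * C + c, r * C + PySem.Int.mod (c + 1) C)])
        (p.left  ++ [(r * C + c, r * C + PySem.Int.mod (c - 1) C)])
        (p.down  ++ [(r * C + c, PySem.Int.mod (r + 1) R * C + c)])
        (p.up    ++ [(r * C + c, PySem.Int.mod (r - 1) R * C + c)])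
        (p.dr    ++ [(r * C + c, PySem.Int.mod (r + 1) R * C + PySem.Int.mod (c + 1) C)])
        (p.dl    ++ [(r * C + c, PySem.Int.mod (r + 1) R * C + PySem.Int.mod (c - 1) C)])
        (p.ur    ++ [(r * C + c, PySem.Int.mod (r - 1) R * C + PySem.Int.mod (c + 1) C)])
        (p.ul    ++ [(r * C + c, PySem.Int.mod (r - 1) R * C + PySem.Int.mod (c - 1) C)])) p) p =
    { right := p.right ++ L.flatMap (fun r => (PySem.List.pyRange 0 C 1).map (fun c => (r * C + c, r * C + PySem.Int.mod (c + 1) C)))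
      left  := p.left  ++ L.flatMap (fun r => (PySem.List.pyRange 0 C 1).map (fun c => (r * C + c, r * C + PySem.Int.mod (c - 1) C)))
      down  := p.down  ++ L.flatMap (fun r => (PySem.List.pyRange 0 C 1).map (fun c => (r * C + c, PySem.Int.mod (r + 1) R * C + c)))
      up    := p.up    ++ L.flatMap (fun r => (PySem.List.pyRange 0 C 1).map (fun c => (r * C + c, PySem.Int.mod (r - 1) R * C + c)))
      dr    := p.dr    ++ L.flatMap (fun r => (PySem.List.pyRange 0 C 1).map (fun c => (r * C + c, PySem.Int.mod (r + 1) R * C + PySem.Int.mod (c + 1) C)))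
      dl    := p.dl    ++ L.flatMap (fun r => (PySem.List.pyRange 0 C 1).map (fun c => (r * C + c, PySem.Int.mod (r + 1) R * C + PySem.Int.mod (c - 1) C)))
      ur    := p.ur    ++ L.flatMap (fun r => (PySem.List.pyRange 0 C 1).map (fun c => (r * C + c, PySem.Int.mod (r - 1) R * C + PySem.Int.mod (c + 1) C)))
      ul    := p.ul    ++ L.flatMap (fun r => (PySem.List.pyRange 0 C 1).map (fun c => (r * C + c, PySem.Int.mod (r - 1) R * C + PySem.Int.mod (c - 1) C))) } := by
  induction L generalizing p with
  | nil => simp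
  | cons x xs ih =>
      rw [List.foldl_cons, pv_inner, ih]
      simp [List.flatMap_cons, List.append_assoc]

-- A's port equals the normal form
lemma pv_A_normal (R C : Int) : make_perms_py R C = pvNormal R C := by
  simp only [make_perms_py, pvNormal]
  rw [pv_outer]
  simp only [List.nil_append]
  have hright := pv_dir_flat R C (fun r c => r * C + PySem.Int.mod (c + 1) C) (pvPhiRight C)
  have hleft := pv_dir_flat R C (fun r c => r * C + PySem.Int.mod (c - 1) C) (pvPhiLeft C)
  have hdown := pv_dir_flat R C (fun r c => PySem.Int.mod (r + 1) R * C + c) (pvPhiDown R C)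
  have hup := pv_dir_flat R C (fun r c => PySem.Int.mod (r - 1) R * C + c) (pvPhiUp R C)
  have hdr := pv_dir_flat R C (fun r c => PySem.Int.mod (r + 1) R * C + PySem.Int.mod (c + 1) C)
      (fun i => pvPhiRight C (pvPhiDown R C i))
  have hdl := pv_dir_flat R C (fun r c => PySem.Int.mod (r + 1) R * C + PySem.Int.mod (c - 1) C)
      (fun i => pvPhiLeft C (pvPhiDown R C i))
  have hur := pv_dir_flat R C (fun r c => PySem.Int.mod (r - 1) R * C + PySem.Int.mod (c + 1) C)
      (fun i => pvPhiRight C (pvPhiUp R C i))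
  have hul := pv_dir_flat R C (fun r c => PySem.Int.mod (r - 1) R * C + PySem.Int.mod (c - 1) C)
      (fun i => pvPhiLeft C (pvPhiUp R C i))
  rw [hright, hleft, hdown, hup, hdr, hdl, hur, hul]
  all_goals intro r c hr0 hrR hc0 hcC
  all_goals obtain ⟨hq, hm⟩ := pv_divmod_rec C r c (by omega) hc0 hcC
  · simp [pvPhiLeft, pvPhiUp, hq, hm,
      (pv_divmod_rec C (PySem.Int.mod (r - 1) R) c (by omega) hc0 hcC).1,
      (pv_divmod_rec C (PySem.Int.mod (r - 1) R) c (by omega) hc0 hcC).2]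
  · simp [pvPhiRight, pvPhiUp, hq, hm,
      (pv_divmod_rec C (PySem.Int.mod (r - 1) R) c (by omega) hc0 hcC).1,
      (pv_divmod_rec C (PySem.Int.mod (r - 1) R) c (by omega) hc0 hcC).2]
  · simp [pvPhiLeft, pvPhiDown, hq, hm,
      (pv_divmod_rec C (PySem.Int.mod (r + 1) R) c (by omega) hc0 hcC).1,
      (pv_divmod_rec C (PySem.Int.mod (r + 1) R) c (by omega) hc0 hcC).2]
  · simp [pvPhiRight, pvPhiDown, hq, hm,
      (pv_divmod_rec C (PySem.Int.mod (r + 1) R) c (by omega) hc0 hcC).1,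
      (pv_divmod_rec C (PySem.Int.mod (r + 1) R) c (by omega) hc0 hcC).2]
  · simp [pvPhiUp, hq, hm]
  · simp [pvPhiDown, hq, hm]
  · simp [pvPhiLeft, hq, hm]
  · simp [pvPhiRight, hq, hm]

-- ---- B-side lemmas: rotations of ranges ----

lemma pv_rng_drop (a b k : Int) (h0 : 0 ≤ k) (h : a + k ≤ b) :
    (PySem.List.pyRange a b 1).drop k.toNat = PySem.List.pyRange (a + k) b 1 := by
  have hl : (PySem.List.pyRange a (a + k) 1).length = k.toNat := by
    rw [PySem.List.length_pyRange_one]; omega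
  rw [PySem.List.pyRange_one_append a (a + k) b (by omega) h, ← hl, List.drop_left]

lemma pv_rng_take (a b k : Int) (h0 : 0 ≤ k) (h : a + k ≤ b) :
    (PySem.List.pyRange a b 1).take k.toNat = PySem.List.pyRange a (a + k) 1 := by
  have hl : (PySem.List.pyRange a (a + k) 1).length = k.toNat := by
    rw [PySem.List.length_pyRange_one]; omega
  rw [PySem.List.pyRange_one_append a (a + k) b (by omega) h, ← hl, List.take_left]

lemma pv_rng_drop0 (b k : Int) (h0 : 0 ≤ k) (h : k ≤ b) :
    (PySem.List.pyRange 0 b 1).drop k.toNat = PySem.List.pyRange k b 1 := by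
  have := pv_rng_drop 0 b k h0 (by omega)
  rwa [zero_add] at this

lemma pv_rng_take0 (b k : Int) (h0 : 0 ≤ k) (h : k ≤ b) :
    (PySem.List.pyRange 0 b 1).take k.toNat = PySem.List.pyRange 0 k 1 := by
  have := pv_rng_take 0 b k h0 (by omega)
  rwa [zero_add] at this

lemma pv_rng_shift (a b d : Int) :
    (PySem.List.pyRange a b 1).map (fun x => d + x) = PySem.List.pyRange (d + a) (d + b) 1 := by
  rw [PySem.List.pyRange_one a b, PySem.List.pyRange_one (d + a) (d + b),
      show d + b - (d + a) = b - a from by ring, List.map_map]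
  congr 1
  funext k
  change d + (a + (k : Int)) = d + a + (k : Int)
  ring

lemma pv_enum_map (n : Int) (f : Int → Int) :
    PySem.List.enumerate ((PySem.List.pyRange 0 n 1).map f) 0 =
      (PySem.List.pyRange 0 n 1).map (fun i => (i, f i)) := by
  apply List.ext_getElem
  · simp [PySem.List.length_enumerate]
  · intro k h1 h2
    rw [PySem.List.getElem_enumerate]
    simp [PySem.List.getElem_pyRange_one]

-- range(0, n, C) is the list of row starts
lemma pv_rowstarts (R C : Int) (hR : 0 < R) (hC : 0 < C) :
    PySem.List.pyRange 0 (R * C) C = (PySem.List.pyRange 0 R 1).map (fun r => r * C) := by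
  rw [PySem.List.pyRange_of_pos _ _ hC, PySem.List.pyRange_one]
  have hlt : (0 : Int) < R * C := by positivity
  rw [if_pos hlt]
  have : (R * C - 0 + C - 1) / C = R := by
    rw [show R * C - 0 + C - 1 = (C - 1) + R * C from by ring,
        Int.add_mul_ediv_right _ _ (by omega : C ≠ 0),
        Int.ediv_eq_zero_of_lt (by omega) (by omega), zero_add]
  rw [this, show R - 0 = R from by ring, List.map_map]
  congr 1
  funext k
  change 0 + C * (k : Int) = (0 + (k : Int)) * C
  ring

-- bounds for the mod-sum form of pvPhiDown/pvPhiUp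
lemma pv_modsum_bounds (R C a b : Int) (hR : 0 < R) (hC : 0 < C) :
    0 ≤ PySem.Int.mod a R * C + PySem.Int.mod b C ∧
      PySem.Int.mod a R * C + PySem.Int.mod b C < R * C := by
  have h1 := PySem.Int.mod_nonneg a hR
  have h2 := PySem.Int.mod_lt a hR
  have h3 := PySem.Int.mod_nonneg b hC
  have h4 := PySem.Int.mod_lt b hC
  constructor
  · nlinarith
  · nlinarith

-- the four cardinal target lists as rotations
lemma pv_right_t (R C : Int) (hR : 0 < R) (hC : 0 < C) :
    (PySem.List.pyRange 0 R 1).flatMap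
        (fun r => PySem.List.pyRange (r * C + 1) (r * C + C) 1 ++ [r * C]) =
      (PySem.List.pyRange 0 (R * C) 1).map (pvPhiRight C) := by
  obtain ⟨m, hm⟩ : ∃ m : Nat, R = (m : Int) := ⟨R.toNat, by omega⟩
  subst hm
  rw [pv_range_split C hC m, List.map_flatMap]
  apply List.flatMap_congr
  intro r hr
  rw [List.map_map]
  have hmap : ((PySem.List.pyRange 0 C 1).map (pvPhiRight C ∘ fun c => r * C + c)) =
      (PySem.List.pyRange 0 C 1).map (fun c => r * C + PySem.Int.mod (c + 1) C) := by
    apply List.map_congr_left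
    intro c hc
    have hc' := (PySem.List.mem_pyRange_one).1 hc
    obtain ⟨hq, hmod⟩ := pv_divmod_rec C r c hC hc'.1 hc'.2
    simp [pvPhiRight, Function.comp, hq, hmod]
  rw [hmap]
  have hsplit : PySem.List.pyRange 0 C 1 = PySem.List.pyRange 0 (C - 1) 1 ++ [C - 1] := by
    have := PySem.List.pyRange_one_succ_right (a := 0) (b := C - 1) (by omega)
    simpa using this
  rw [hsplit, List.map_append]
  have hfirst : (PySem.List.pyRange 0 (C - 1) 1).map (fun c => r * C + PySem.Int.mod (c + 1) C) =
      PySem.List.pyRange (r * C + 1) (r * C + C) 1 := by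
    have h1 : (PySem.List.pyRange 0 (C - 1) 1).map (fun c => r * C + PySem.Int.mod (c + 1) C) =
        (PySem.List.pyRange 0 (C - 1) 1).map (fun c => (r * C + 1) + c) := by
      apply List.map_congr_left
      intro c hc
      have hc' := (PySem.List.mem_pyRange_one).1 hc
      rw [pv_mod_eq_self (c + 1) C (by omega) (by omega)]
      ring
    rw [h1, pv_rng_shift 0 (C - 1) (r * C + 1),
        show r * C + 1 + 0 = r * C + 1 from by ring,
        show r * C + 1 + (C - 1) = r * C + C from by ring]
  rw [hfirst]
  simp only [List.map_cons, List.map_nil]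
  rw [show PySem.Int.mod (C - 1 + 1) C = 0 from by
        rw [show C - 1 + 1 = C from by ring]; exact pv_mod_self C hC]
  rw [show r * C + 0 = r * C from by ring]

lemma pv_left_t (R C : Int) (hR : 0 < R) (hC : 0 < C) :
    (PySem.List.pyRange 0 R 1).flatMap
        (fun r => [r * C + (C - 1)] ++ PySem.List.pyRange (r * C) (r * C + (C - 1)) 1) =
      (PySem.List.pyRange 0 (R * C) 1).map (pvPhiLeft C) := by
  obtain ⟨m, hm⟩ : ∃ m : Nat, R = (m : Int) := ⟨R.toNat, by omega⟩
  subst hm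
  rw [pv_range_split C hC m, List.map_flatMap]
  apply List.flatMap_congr
  intro r hr
  rw [List.map_map]
  have hmap : ((PySem.List.pyRange 0 C 1).map (pvPhiLeft C ∘ fun c => r * C + c)) =
      (PySem.List.pyRange 0 C 1).map (fun c => r * C + PySem.Int.mod (c - 1) C) := by
    apply List.map_congr_left
    intro c hc
    have hc' := (PySem.List.mem_pyRange_one).1 hc
    obtain ⟨hq, hmod⟩ := pv_divmod_rec C r c hC hc'.1 hc'.2
    simp [pvPhiLeft, Function.comp, hq, hmod]
  rw [hmap]
  rw [PySem.List.pyRange_one_cons (show (0:Int) < C from hC), List.map_cons]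
  have hm1 : PySem.Int.mod ((0:Int) - 1) C = C - 1 := by
    rw [show (0:Int) - 1 = -1 from by ring, pv_mod_add_R (-1) C hC (by omega) (by omega)]
    ring
  rw [hm1]
  have hrest : (PySem.List.pyRange (0 + 1) C 1).map (fun c => r * C + PySem.Int.mod (c - 1) C) =
      PySem.List.pyRange (r * C) (r * C + (C - 1)) 1 := by
    have h1 : (PySem.List.pyRange (0 + 1) C 1).map (fun c => r * C + PySem.Int.mod (c - 1) C) =
        (PySem.List.pyRange (0 + 1) C 1).map (fun c => (r * C - 1) + c) := by
      apply List.map_congr_left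
      intro c hc
      have hc' := (PySem.List.mem_pyRange_one).1 hc
      rw [pv_mod_eq_self (c - 1) C (by omega) (by omega)]
      ring
    rw [h1, pv_rng_shift (0 + 1) C (r * C - 1),
        show r * C - 1 + (0 + 1) = r * C from by ring,
        show r * C - 1 + C = r * C + (C - 1) from by ring]
  rw [hrest]
  rfl

lemma pv_down_t (R C : Int) (hR : 0 < R) (hC : 0 < C) :
    PySem.List.pyRange C (R * C) 1 ++ PySem.List.pyRange 0 C 1 =
      (PySem.List.pyRange 0 (R * C) 1).map (pvPhiDown R C) := by
  have hn : C ≤ R * C := by nlinarith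
  rw [PySem.List.pyRange_one_append 0 (R * C - C) (R * C) (by omega) (by omega), List.map_append]
  have hfirst : (PySem.List.pyRange 0 (R * C - C) 1).map (pvPhiDown R C) =
      PySem.List.pyRange C (R * C) 1 := by
    have h1 : (PySem.List.pyRange 0 (R * C - C) 1).map (pvPhiDown R C) =
        (PySem.List.pyRange 0 (R * C - C) 1).map (fun i => C + i) := by
      apply List.map_congr_left
      intro i hi
      have hi' := (PySem.List.mem_pyRange_one).1 hi
      have hq0 : 0 ≤ PySem.Int.floordiv i C := by
        rw [PySem.Int.floordiv_eq_ediv_of_pos hC]; exact Int.ediv_nonneg hi'.1 (by omega)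
      have hqlt : PySem.Int.floordiv i C < R - 1 := by
        rw [PySem.Int.floordiv_lt_iff_lt_mul hC]; nlinarith [hi'.2]
      have heq := PySem.Int.floordiv_mul_add_mod i C
      unfold pvPhiDown
      rw [pv_mod_eq_self (PySem.Int.floordiv i C + 1) R (by omega) (by omega)]
      nlinarith [heq]
    rw [h1, pv_rng_shift 0 (R * C - C) C,
        show C + 0 = C from by ring, show C + (R * C - C) = R * C from by ring]
  have hsecond : (PySem.List.pyRange (R * C - C) (R * C) 1).map (pvPhiDown R C) =
      PySem.List.pyRange 0 C 1 := by
    have h1 : (PySem.List.pyRange (R * C - C) (R * C) 1).map (pvPhiDown R C) =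
        (PySem.List.pyRange (R * C - C) (R * C) 1).map (fun i => (C - R * C) + i) := by
      apply List.map_congr_left
      intro i hi
      have hi' := (PySem.List.mem_pyRange_one).1 hi
      have hq : PySem.Int.floordiv i C = R - 1 := by
        rw [PySem.Int.floordiv_eq_iff_of_pos hC]
        constructor
        · nlinarith [hi'.1]
        · nlinarith [hi'.2]
      have heq := PySem.Int.floordiv_mul_add_mod i C
      unfold pvPhiDown
      rw [hq, show R - 1 + 1 = R from by ring, pv_mod_self R hR]
      rw [hq] at heq
      nlinarith [heq]
    rw [h1, pv_rng_shift (R * C - C) (R * C) (C - R * C),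
        show C - R * C + (R * C - C) = 0 from by ring,
        show C - R * C + R * C = C from by ring]
  rw [hfirst, hsecond]

lemma pv_up_t (R C : Int) (hR : 0 < R) (hC : 0 < C) :
    PySem.List.pyRange (R * C - C) (R * C) 1 ++ PySem.List.pyRange 0 (R * C - C) 1 =
      (PySem.List.pyRange 0 (R * C) 1).map (pvPhiUp R C) := by
  have hn : C ≤ R * C := by nlinarith
  rw [PySem.List.pyRange_one_append 0 C (R * C) (by omega) hn, List.map_append]
  have hfirst : (PySem.List.pyRange 0 C 1).map (pvPhiUp R C) =
      PySem.List.pyRange (R * C - C) (R * C) 1 := by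
    have h1 : (PySem.List.pyRange 0 C 1).map (pvPhiUp R C) =
        (PySem.List.pyRange 0 C 1).map (fun i => (R * C - C) + i) := by
      apply List.map_congr_left
      intro i hi
      have hi' := (PySem.List.mem_pyRange_one).1 hi
      have hq : PySem.Int.floordiv i C = 0 := by
        rw [PySem.Int.floordiv_eq_iff_of_pos hC]
        constructor
        · omega
        · omega
      have heq := PySem.Int.floordiv_mul_add_mod i C
      rw [hq] at heq
      unfold pvPhiUp
      rw [hq, show (0:Int) - 1 = -1 from by ring,
          pv_mod_add_R (-1) R hR (by omega) (by omega)]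
      nlinarith [heq]
    rw [h1, pv_rng_shift 0 C (R * C - C),
        show R * C - C + 0 = R * C - C from by ring,
        show R * C - C + C = R * C from by ring]
  have hsecond : (PySem.List.pyRange C (R * C) 1).map (pvPhiUp R C) =
      PySem.List.pyRange 0 (R * C - C) 1 := by
    have h1 : (PySem.List.pyRange C (R * C) 1).map (pvPhiUp R C) =
        (PySem.List.pyRange C (R * C) 1).map (fun i => (-C) + i) := by
      apply List.map_congr_left
      intro i hi
      have hi' := (PySem.List.mem_pyRange_one).1 hi
      have hq1 : 1 ≤ PySem.Int.floordiv i C := by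
        rw [PySem.Int.le_floordiv_iff_mul_le hC]; omega
      have hqR : PySem.Int.floordiv i C < R := by
        rw [PySem.Int.floordiv_lt_iff_lt_mul hC]; nlinarith [hi'.2]
      have heq := PySem.Int.floordiv_mul_add_mod i C
      unfold pvPhiUp
      rw [pv_mod_eq_self (PySem.Int.floordiv i C - 1) R (by omega) (by omega)]
      nlinarith [heq]
    rw [h1, pv_rng_shift C (R * C) (-C),
        show -C + C = 0 from by ring, show -C + R * C = R * C - C from by ring]
  rw [hfirst, hsecond]

-- composition by list indexing
lemma pv_comp_map (n : Int) (f g : Int → Int)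
    (hg : ∀ i, 0 ≤ g i ∧ g i < n) :
    ((PySem.List.pyRange 0 n 1).map g).map
        (fun j => PySem.List.pyGetD ((PySem.List.pyRange 0 n 1).map f) j 0) =
      (PySem.List.pyRange 0 n 1).map (fun i => f (g i)) := by
  rw [List.map_map]
  apply List.map_congr_left
  intro i _
  simp only [Function.comp]
  exact PySem.List.pyGetD_map_pyRange_of_nonneg f n (g i) 0 (hg i).1 (hg i).2

-- B's port equals the normal form
lemma pv_B_normal (R C : Int) : make_perms_py_alt R C = pvNormal R C := by
  by_cases h : R ≤ 0 ∨ C ≤ 0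
  · simp only [make_perms_py_alt, if_pos h, pvNormal, if_neg (show ¬(0 < R ∧ 0 < C) from by omega)]
    rw [PySem.List.pyRange_one_eq_nil (le_refl (0 : Int))]
    simp
  · have hR : 0 < R := by omega
    have hC : 0 < C := by omega
    have hn : 0 < R * C := by positivity
    have hlen : ((PySem.List.pyRange 0 (R * C) 1).length : Int) = R * C := by
      rw [PySem.List.length_pyRange_one]; omega
    -- slice computations on base = range(n)
    have hblock : ∀ r : Int, 0 ≤ r → r < R →
        PySem.List.slice (PySem.List.pyRange 0 (R * C) 1) (some (r * C)) (some (r * C + C)) =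
          PySem.List.pyRange (r * C) (r * C + C) 1 := by
      intro r h0 h1
      have hb1 : 0 ≤ r * C := by positivity
      have hb2 : r * C + C ≤ R * C := by nlinarith
      rw [PySem.List.slice_of_nonneg _ hb1 (by omega) (by omega) (by omega),
          show (r * C + C).toNat - (r * C).toNat = C.toNat from by omega,
          pv_rng_drop0 (R * C) (r * C) hb1 (by omega)]
      exact pv_rng_take (r * C) (R * C) C (by omega) (by omega)
    have hdrop : ∀ k : Int, 0 ≤ k → k ≤ R * C →
        PySem.List.slice (PySem.List.pyRange 0 (R * C) 1) (some k) none =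
          PySem.List.pyRange k (R * C) 1 := by
      intro k h0 h1
      rw [PySem.List.slice_from _ h0, pv_rng_drop0 (R * C) k h0 h1]
    have htake : ∀ k : Int, 0 ≤ k → k ≤ R * C →
        PySem.List.slice (PySem.List.pyRange 0 (R * C) 1) none (some k) =
          PySem.List.pyRange 0 k 1 := by
      intro k h0 h1
      rw [PySem.List.slice_to _ h0]
      exact pv_rng_take0 (R * C) k h0 h1
    simp only [make_perms_py_alt, if_neg (show ¬(R ≤ 0 ∨ C ≤ 0) from by omega)]
    -- split the pair fold into the two accumulating loops and close them as flatMaps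
    rw [PySem.List.foldl_prod_mk
        (f := fun (acc : List Int) (r0 : Int) => acc ++
          (PySem.List.slice (PySem.List.slice (PySem.List.pyRange 0 (R * C) 1) (some r0) (some (r0 + C))) (some 1) none ++
           PySem.List.slice (PySem.List.slice (PySem.List.pyRange 0 (R * C) 1) (some r0) (some (r0 + C))) none (some 1)))
        (g := fun (acc : List Int) (r0 : Int) => acc ++
          (PySem.List.slice (PySem.List.slice (PySem.List.pyRange 0 (R * C) 1) (some r0) (some (r0 + C))) (some (C - 1)) none ++
           PySem.List.slice (PySem.List.slice (PySem.List.pyRange 0 (R * C) 1) (some r0) (some (r0 + C))) none (some (C - 1))))]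
    rw [PySem.List.foldl_append_eq_flatMap, PySem.List.foldl_append_eq_flatMap]
    simp only [List.nil_append]
    rw [pv_rowstarts R C hR hC]
    simp only [List.flatMap_map]
    -- identify the two rotation lists
    have hright : (PySem.List.pyRange 0 R 1).flatMap
        (fun r => PySem.List.slice (PySem.List.slice (PySem.List.pyRange 0 (R * C) 1) (some (r * C)) (some (r * C + C))) (some 1) none ++
           PySem.List.slice (PySem.List.slice (PySem.List.pyRange 0 (R * C) 1) (some (r * C)) (some (r * C + C))) none (some 1)) =
        (PySem.List.pyRange 0 (R * C) 1).map (pvPhiRight C) := by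
      rw [← pv_right_t R C hR hC]
      apply List.flatMap_congr
      intro r hr
      have hr' := (PySem.List.mem_pyRange_one).1 hr
      rw [hblock r hr'.1 hr'.2,
          PySem.List.slice_from _ (by omega : (0:Int) ≤ 1),
          pv_rng_drop (r * C) (r * C + C) 1 (by omega) (by omega),
          PySem.List.slice_to _ (by omega : (0:Int) ≤ 1),
          pv_rng_take (r * C) (r * C + C) 1 (by omega) (by omega),
          PySem.List.pyRange_one_singleton]
    have hleft : (PySem.List.pyRange 0 R 1).flatMap
        (fun r => PySem.List.slice (PySem.List.slice (PySem.List.pyRange 0 (R * C) 1) (some (r * C)) (some (r * C + C))) (some (C - 1)) none ++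
           PySem.List.slice (PySem.List.slice (PySem.List.pyRange 0 (R * C) 1) (some (r * C)) (some (r * C + C))) none (some (C - 1))) =
        (PySem.List.pyRange 0 (R * C) 1).map (pvPhiLeft C) := by
      rw [← pv_left_t R C hR hC]
      apply List.flatMap_congr
      intro r hr
      have hr' := (PySem.List.mem_pyRange_one).1 hr
      rw [hblock r hr'.1 hr'.2,
          PySem.List.slice_from _ (by omega : (0:Int) ≤ C - 1),
          pv_rng_drop (r * C) (r * C + C) (C - 1) (by omega) (by omega),
          PySem.List.slice_to _ (by omega : (0:Int) ≤ C - 1),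
          pv_rng_take (r * C) (r * C + C) (C - 1) (by omega) (by omega)]
      rw [show PySem.List.pyRange (r * C + (C - 1)) (r * C + C) 1 = [r * C + (C - 1)] from by
            rw [show r * C + C = (r * C + (C - 1)) + 1 from by ring]
            exact PySem.List.pyRange_one_singleton _]
    rw [hright, hleft]
    rw [hdrop C (by omega) (by nlinarith), htake C (by omega) (by nlinarith)]
    rw [hdrop (R * C - C) (by nlinarith) (by omega), htake (R * C - C) (by nlinarith) (by omega)]
    rw [pv_down_t R C hR hC, pv_up_t R C hR hC]
    rw [pv_comp_map (R * C) (pvPhiRight C) (pvPhiDown R C)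
          (fun i => pv_modsum_bounds R C (PySem.Int.floordiv i C + 1) i hR hC),
        pv_comp_map (R * C) (pvPhiLeft C) (pvPhiDown R C)
          (fun i => pv_modsum_bounds R C (PySem.Int.floordiv i C + 1) i hR hC),
        pv_comp_map (R * C) (pvPhiRight C) (pvPhiUp R C)
          (fun i => pv_modsum_bounds R C (PySem.Int.floordiv i C - 1) i hR hC),
        pv_comp_map (R * C) (pvPhiLeft C) (pvPhiUp R C)
          (fun i => pv_modsum_bounds R C (PySem.Int.floordiv i C - 1) i hR hC)]
    simp only [pvNormal, if_pos (And.intro hR hC)]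
    rw [pv_enum_map (R * C) (pvPhiRight C), pv_enum_map (R * C) (pvPhiLeft C),
        pv_enum_map (R * C) (pvPhiDown R C), pv_enum_map (R * C) (pvPhiUp R C),
        pv_enum_map (R * C) (fun i => pvPhiRight C (pvPhiDown R C i)),
        pv_enum_map (R * C) (fun i => pvPhiLeft C (pvPhiDown R C i)),
        pv_enum_map (R * C) (fun i => pvPhiRight C (pvPhiUp R C i)),
        pv_enum_map (R * C) (fun i => pvPhiLeft C (pvPhiUp R C i))]

-- ===== VERDICT (by name: the statement is the Claim_ definition above) =====
theorem make_perms_py_spec : Claim_equal_make_perms_py := by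
  intro R C _
  unfold Spec_make_perms_py
  rw [pv_A_normal R C, pv_B_normal R C]
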